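-- pv_equiv track=rewrite | github.com/AaronSamuuel/crypto-programs | code-39.py | frequency_attack_additive
-- ===== SOURCE A (Python) =====
-- from collections import Counter
--
-- def additive_decrypt(ciphertext, shift):
--     result = ""
--     for ch in ciphertext.upper():
--         if ch.isalpha():
--             result += chr(((ord(ch) - 65 - shift) % 26) + 65)
--         else:
--             result += ch
--     return result
--
-- def frequency_attack_additive(ciphertext, top_n=10):
--     freq = Counter(ciphertext.replace(" ", "").upper())
--     most_common_cipher = freq.most_common(1)[0][0]
--     most_common_english = 'E'
--     shift_guess = (ord(most_common_cipher) - ord(most_common_english)) % 26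
--
--     results = []
--     for i in range(top_n):
--         pt = additive_decrypt(ciphertext, (shift_guess + i) % 26)
--         results.append(pt)
--     return results
-- ===== SOURCE B (Python) =====
-- from collections import Counter
--
-- def frequency_attack_additive(ciphertext, top_n=10):
--     freq = Counter(ciphertext.replace(" ", "").upper())
--     most_common_cipher = freq.most_common(1)[0][0]
--     shift_guess = (ord(most_common_cipher) - ord('E')) % 26
--     # decrypt once with the guessed shift, then roll each next candidate
--     # out of the previous one by shifting its letters down one position
--     cur = "".join(
--         chr((ord(c) - 65 - shift_guess) % 26 + 65) if c.isalpha() else c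
--         for c in ciphertext.upper()
--     )
--     results = []
--     for _ in range(top_n):
--         results.append(cur)
--         cur = "".join(chr((ord(c) - 66) % 26 + 65) if c.isalpha() else c for c in cur)
--     return results
-- ===== Notes on version B (the rewrite author's own statement) =====
-- stated objective: alternative
-- what changed: B decrypts the ciphertext only once with the guessed shift and derives each further candidate by rotating the previous result's letters down one position, instead of re-decrypting the original ciphertext from scratch for every shift.
import Mathlib
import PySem

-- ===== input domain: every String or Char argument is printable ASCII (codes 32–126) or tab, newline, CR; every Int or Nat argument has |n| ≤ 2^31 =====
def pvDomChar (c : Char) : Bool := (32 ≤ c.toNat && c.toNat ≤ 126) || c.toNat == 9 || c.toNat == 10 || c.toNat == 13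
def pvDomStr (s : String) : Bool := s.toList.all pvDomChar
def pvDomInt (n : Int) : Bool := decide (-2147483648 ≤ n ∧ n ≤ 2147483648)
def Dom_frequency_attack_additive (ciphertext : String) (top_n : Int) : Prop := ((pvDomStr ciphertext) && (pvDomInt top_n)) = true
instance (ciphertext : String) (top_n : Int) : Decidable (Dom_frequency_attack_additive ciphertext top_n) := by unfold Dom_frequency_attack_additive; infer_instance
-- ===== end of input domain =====

-- B decrypts once with the guessed shift and rolls each further candidate out of the
-- previous result (shift letters down by one), instead of re-decrypting per shift
-- (objective: alternative decomposition, same cost).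

-- ===== PORT A =====
def additive_decrypt (ciphertext : String) (shift : Int) : String :=
  String.mk ((PySem.Str.upper ciphertext).toList.foldl (fun result ch =>
    if PySem.Chars.isalpha ch then
      result ++ [Char.ofNat ((PySem.Int.mod ((ch.toNat : Int) - 65 - shift) 26 + 65).toNat)]
    else
      result ++ [ch]) [])

-- freq = Counter(ciphertext.replace(" ", "").upper()); most_common(1)[0][0] is the
-- first key of maximal count in insertion order (= PySem.List.max?, first extremal).
def frequency_attack_additive (ciphertext : String) (top_n : Int) : List String :=
  match PySem.List.max?
      (PySem.Dict.counter (PySem.Str.upper (PySem.Str.replace ciphertext " " "")).toList).items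
      (fun kv => kv.2) with
  | none => []  -- Python raises IndexError here; excluded by Pre_
  | some mc =>
    (PySem.List.pyRange 0 top_n 1).foldl (fun results i =>
      results ++ [additive_decrypt ciphertext
        (PySem.Int.mod (PySem.Int.mod ((mc.1.toNat : Int) - 69) 26 + i) 26)]) []

-- ===== PORT B =====
-- one char of B's join-comprehensions: decrypt by shift s
def pvDecChar (s : Int) (c : Char) : Char :=
  if PySem.Chars.isalpha c then
    Char.ofNat ((PySem.Int.mod ((c.toNat : Int) - 65 - s) 26 + 65).toNat)
  else c

-- B's rolling loop: append cur, then shift cur's letters down one ((ord c - 66) % 26 + 65 = pvDecChar 1)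
def pvRoll (n : Nat) (cur : List Char) : List String :=
  match n with
  | 0 => []
  | n + 1 => String.mk cur :: pvRoll n (cur.map (pvDecChar 1))

def frequency_attack_additive_alt (ciphertext : String) (top_n : Int) : List String :=
  match PySem.List.max?
      (PySem.Dict.counter (PySem.Str.upper (PySem.Str.replace ciphertext " " "")).toList).items
      (fun kv => kv.2) with
  | none => []  -- Python raises IndexError here; excluded by Pre_
  | some mc =>
    pvRoll top_n.toNat
      ((PySem.Str.upper ciphertext).toList.map
        (pvDecChar (PySem.Int.mod ((mc.1.toNat : Int) - 69) 26)))

-- ===== PRECONDITION & SPEC =====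
-- Pre_ excludes only the ciphertexts that are empty after removing spaces:
-- there Python's freq.most_common(1)[0] raises IndexError (in A and in B alike).
def Pre_frequency_attack_additive (ciphertext : String) (top_n : Int) : Prop :=
  PySem.Chars.replace ciphertext.toList [' '] [] ≠ []
instance (ciphertext : String) (top_n : Int) : Decidable (Pre_frequency_attack_additive ciphertext top_n) := by unfold Pre_frequency_attack_additive; infer_instance

def pvWitness_frequency_attack_additive : String × Int := ("Khoor Zruog!", 3)

def Spec_frequency_attack_additive (ciphertext : String) (top_n : Int) (out : List String) : Prop := out = frequency_attack_additive_alt ciphertext top_n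
instance (ciphertext : String) (top_n : Int) (out : List String) : Decidable (Spec_frequency_attack_additive ciphertext top_n out) := by unfold Spec_frequency_attack_additive; infer_instance

-- ===== CLAIM (what is proved, stated in full; the proofs are below) =====
def Claim_equal_frequency_attack_additive : Prop := ∀ (ciphertext : String) (top_n : Int), Dom_frequency_attack_additive ciphertext top_n → Pre_frequency_attack_additive ciphertext top_n → Spec_frequency_attack_additive ciphertext top_n (frequency_attack_additive ciphertext top_n)

-- ===== LEMMAS AND PROOFS =====

-- the per-char decryption only depends on the shift modulo 26
theorem pvDecChar_mod (s : Int) (c : Char) : pvDecChar (PySem.Int.mod s 26) c = pvDecChar s c := by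
  have h26 : (0:Int) < 26 := by norm_num
  unfold pvDecChar
  split_ifs with h
  · congr 2
    rw [PySem.Int.mod_eq_emod_of_pos h26, PySem.Int.mod_eq_emod_of_pos h26,
        PySem.Int.mod_eq_emod_of_pos h26]
    omega
  · rfl

-- shifting an already-decrypted char down one more step decrypts by s+1
theorem pvDecChar_step (s : Int) (c : Char) : pvDecChar 1 (pvDecChar s c) = pvDecChar (s + 1) c := by
  have h26 : (0:Int) < 26 := by norm_num
  unfold pvDecChar
  by_cases h : PySem.Chars.isalpha c = true
  · rw [if_pos h, if_pos h]
    have hm := PySem.Int.mod_nonneg ((c.toNat : Int) - 65 - s) h26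
    have hm' := PySem.Int.mod_lt ((c.toNat : Int) - 65 - s) h26
    revert hm hm'
    rw [PySem.Int.mod_eq_emod_of_pos h26]
    generalize hmdef : ((c.toNat : Int) - 65 - s) % 26 = m
    intro hm hm'
    have hv : Nat.isValidChar (m + 65).toNat := Or.inl (by omega)
    have htn : (Char.ofNat (m + 65).toNat).toNat = (m + 65).toNat := by
      rw [Char.toNat_ofNat, if_pos hv]
    have halpha : PySem.Chars.isalpha (Char.ofNat (m + 65).toNat) = true := by
      interval_cases m <;> decide
    rw [if_pos halpha, htn]
    congr 1
    rw [PySem.Int.mod_eq_emod_of_pos h26, PySem.Int.mod_eq_emod_of_pos h26]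
    omega
  · rw [if_neg h, if_neg h, if_neg h]

theorem pvDec_step (s : Int) (cs : List Char) :
    (cs.map (pvDecChar s)).map (pvDecChar 1) = cs.map (pvDecChar (s + 1)) := by
  rw [List.map_map]
  exact List.map_congr_left (fun c _ => pvDecChar_step s c)

-- A's character loop (string built by repeated append) is the map by pvDecChar
theorem additive_decrypt_eq_map (ciphertext : String) (shift : Int) :
    additive_decrypt ciphertext shift
      = String.mk ((PySem.Str.upper ciphertext).toList.map (pvDecChar shift)) := by
  unfold additive_decrypt
  congr 1
  calc (PySem.Str.upper ciphertext).toList.foldl (fun result ch =>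
        if PySem.Chars.isalpha ch then
          result ++ [Char.ofNat ((PySem.Int.mod ((ch.toNat : Int) - 65 - shift) 26 + 65).toNat)]
        else result ++ [ch]) []
      = (PySem.Str.upper ciphertext).toList.foldl
          (fun result ch => result ++ [pvDecChar shift ch]) [] := by
        apply PySem.List.foldl_congr_mem
        intro acc a _
        unfold pvDecChar
        split_ifs <;> rfl
    _ = [] ++ (PySem.Str.upper ciphertext).toList.map (pvDecChar shift) :=
        PySem.List.foldl_append_singleton_eq_map _ _ _
    _ = (PySem.Str.upper ciphertext).toList.map (pvDecChar shift) := by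
        rw [List.nil_append]

-- B's rolling loop produces the successive decryptions
theorem pvRoll_eq (n : Nat) (g : Int) (us : List Char) :
    pvRoll n (us.map (pvDecChar g))
      = (List.range n).map (fun i : Nat => String.mk (us.map (pvDecChar (g + (i : Int))))) := by
  induction n generalizing g with
  | zero => rfl
  | succ n ih =>
    rw [show pvRoll (n + 1) (us.map (pvDecChar g))
        = String.mk (us.map (pvDecChar g)) :: pvRoll n ((us.map (pvDecChar g)).map (pvDecChar 1))
        from rfl]
    rw [pvDec_step, ih (g + 1), List.range_succ_eq_map, List.map_cons, List.map_map]
    congr 1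
    · norm_num
    · apply List.map_congr_left
      intro i _
      simp only [Function.comp_apply]
      congr 3
      push_cast
      ring

-- A's accumulation loop over range(top_n)
theorem pvA_loop_eq (g : Int) (ciphertext : String) (n : Nat) :
    (PySem.List.pyRange 0 (n : Int) 1).foldl (fun results i =>
        results ++ [additive_decrypt ciphertext (PySem.Int.mod (g + i) 26)]) []
      = (List.range n).map (fun i : Nat =>
          String.mk ((PySem.Str.upper ciphertext).toList.map (pvDecChar (g + (i : Int))))) := by
  rw [PySem.List.foldl_append_singleton_eq_map, List.nil_append,
      PySem.List.pyRange_one 0 (n : Int), List.map_map]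
  have hn : ((n : Int) - 0).toNat = n := by omega
  rw [hn]
  apply List.map_congr_left
  intro i _
  simp only [Function.comp_apply, zero_add]
  rw [additive_decrypt_eq_map]
  congr 1
  exact List.map_congr_left (fun c _ => pvDecChar_mod (g + i) c)

-- ===== VERDICT (by name: the statement is the Claim_ definition above) =====
theorem frequency_attack_additive_spec : Claim_equal_frequency_attack_additive := by
  intro ciphertext top_n _ _
  unfold Spec_frequency_attack_additive frequency_attack_additive frequency_attack_additive_alt
  cases hmc : PySem.List.max?
      (PySem.Dict.counter (PySem.Str.upper (PySem.Str.replace ciphertext " " "")).toList).items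
      (fun kv => kv.2) with
  | none => rfl
  | some mc =>
    simp only
    by_cases hn : 0 ≤ top_n
    · obtain ⟨n, rfl⟩ := Int.eq_ofNat_of_zero_le hn
      rw [pvA_loop_eq, Int.toNat_natCast, pvRoll_eq]
    · rw [PySem.List.pyRange_one_eq_nil (by omega)]
      have h0 : top_n.toNat = 0 := by omega
      rw [h0]
      rfl
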